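-- pv_equiv track=rewrite | github.com/m-alcon/placement-eda | scripts/data_generator.py | generate_spiral
-- ===== SOURCE A (Python) =====
-- def generate_spiral(w, h):
--     n, graph, positions = w*h, [[] for x in range(w*h)], [[] for x in range(w*h)]
--     for i in range(h):
--         if i%2 == 0:
--             order = range(w)
--             operation = 1
--         else:
--             order = reversed(range(w))
--             operation = -1
--         for j in order:
--             u = i*w + j
--             positions[u] = [i,j]
--             j_aux = j + operation
--             if j_aux >= 0 and j_aux < w:
--                 graph[u].append(str(j_aux + i*w))
--                 graph[j_aux + i*w].append(str(u))
--             elif i+1 < h: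
--                 graph[u].append(str((i+1)*w + j))
--                 graph[(i+1)*w + j].append(str(u))
--     return n, graph, positions
-- ===== SOURCE B (Python) =====
-- def generate_spiral(w, h):
--     # Build the boustrophedon path as rows of node ids, then chain consecutive
--     # path nodes into edges (return value identical to A's interleaved branching).
--     n = w * h
--     positions = [[] for _ in range(n)]
--     order = []
--     for i in range(h):
--         if i % 2 == 0:
--             row = list(range(i * w, i * w + w))
--         else:
--             row = list(range(i * w + w - 1, i * w - 1, -1))
--         for u in row:
--             positions[u] = [i, u - i * w]
--         order.extend(row)
--     graph = [[] for _ in range(n)]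
--     for a, b in zip(order, order[1:]):
--         graph[a].append(str(b))
--         graph[b].append(str(a))
--     return n, graph, positions
-- ===== Notes on version B (the rewrite author's own statement) =====
-- stated objective: alternative
-- what changed: B precomputes the whole boustrophedon path (rows as direct ranges of node ids) and adds edges by chaining consecutive path nodes, replacing A's per-cell in-bounds/down-edge branching with operation offsets.
import Mathlib
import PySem

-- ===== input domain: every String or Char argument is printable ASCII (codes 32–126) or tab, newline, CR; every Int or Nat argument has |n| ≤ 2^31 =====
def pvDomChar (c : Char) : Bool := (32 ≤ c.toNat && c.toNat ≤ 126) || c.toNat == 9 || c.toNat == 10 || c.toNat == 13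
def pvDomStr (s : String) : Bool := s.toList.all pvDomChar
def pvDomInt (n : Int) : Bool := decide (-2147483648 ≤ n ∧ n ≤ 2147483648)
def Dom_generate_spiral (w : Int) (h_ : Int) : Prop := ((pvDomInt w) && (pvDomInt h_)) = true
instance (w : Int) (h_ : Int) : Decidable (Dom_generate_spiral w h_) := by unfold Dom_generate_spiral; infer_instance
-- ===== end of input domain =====

-- B chains consecutive nodes of the precomputed boustrophedon path instead of A's
-- per-cell branching; equivalence proved on the whole domain (both ports are total).

-- Shared Python-primitive helpers (list item assignment / list.append at an index).
-- Exact for 0 ≤ i < length (the only indices either program reaches); Python would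
-- wrap a negative index, which never occurs here.
def pySet {α : Type} (xs : List α) (i : Int) (v : α) : List α :=
  if 0 ≤ i then xs.set i.toNat v else xs

def pyApp (g : List (List String)) (i : Int) (s : String) : List (List String) :=
  if 0 ≤ i then g.modify i.toNat (· ++ [s]) else g

-- ===== PORT A =====
def generate_spiral (w : Int) (h_ : Int) : Int × List (List String) × List (List Int) :=
  let n := w * h_
  let graph : List (List String) := (PySem.List.pyRange 0 (w*h_) 1).map (fun _ => [])
  let positions : List (List Int) := (PySem.List.pyRange 0 (w*h_) 1).map (fun _ => [])
  let st := (PySem.List.pyRange 0 h_ 1).foldl (fun st i =>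
    let order : List Int :=
      if PySem.Int.mod i 2 == 0 then PySem.List.pyRange 0 w 1
      else (PySem.List.pyRange 0 w 1).reverse
    let operation : Int := if PySem.Int.mod i 2 == 0 then 1 else -1
    order.foldl (fun st j =>
      let graph := st.1
      let positions := st.2
      let u := i*w + j
      let positions := pySet positions u [i, j]
      let j_aux := j + operation
      if j_aux ≥ 0 ∧ j_aux < w then
        (pyApp (pyApp graph u (PySem.Int.toStr (j_aux + i*w))) (j_aux + i*w) (PySem.Int.toStr u), positions)
      else if i+1 < h_ then
        (pyApp (pyApp graph u (PySem.Int.toStr ((i+1)*w + j))) ((i+1)*w + j) (PySem.Int.toStr u), positions)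
      else (graph, positions)) st) (graph, positions)
  (n, st.1, st.2)

-- ===== PORT B =====
def generate_spiral_alt (w : Int) (h_ : Int) : Int × List (List String) × List (List Int) :=
  let n := w * h_
  let positions0 : List (List Int) := (PySem.List.pyRange 0 n 1).map (fun _ => [])
  let st := (PySem.List.pyRange 0 h_ 1).foldl (fun (st : List Int × List (List Int)) i =>
    let row : List Int :=
      if PySem.Int.mod i 2 == 0 then PySem.List.pyRange (i*w) (i*w + w) 1
      else PySem.List.pyRange (i*w + w - 1) (i*w - 1) (-1)
    let positions := row.foldl (fun p u => pySet p u [i, u - i*w]) st.2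
    (st.1 ++ row, positions)) ([], positions0)
  let order := st.1
  let graph0 : List (List String) := (PySem.List.pyRange 0 n 1).map (fun _ => [])
  let graph := (order.zip (order.drop 1)).foldl (fun g ab =>
    pyApp (pyApp g ab.1 (PySem.Int.toStr ab.2)) ab.2 (PySem.Int.toStr ab.1)) graph0
  (n, graph, st.2)

-- ===== PRECONDITION & SPEC =====
def Spec_generate_spiral (w : Int) (h_ : Int) (out : Int × List (List String) × List (List Int)) : Prop := out = generate_spiral_alt w h_
instance (w : Int) (h_ : Int) (out : Int × List (List String) × List (List Int)) : Decidable (Spec_generate_spiral w h_ out) := by unfold Spec_generate_spiral; infer_instance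

-- ===== CLAIM (what is proved, stated in full; the proofs are below) =====
def Claim_equal_generate_spiral : Prop := ∀ (w : Int) (h_ : Int), Dom_generate_spiral w h_ → Spec_generate_spiral w h_ (generate_spiral w h_)

-- ===== LEMMAS AND PROOFS =====

-- Proof-side names for the pieces of the two ports.
def jlistA (w i : Int) : List Int :=
  if PySem.Int.mod i 2 == 0 then PySem.List.pyRange 0 w 1 else (PySem.List.pyRange 0 w 1).reverse

def opA (i : Int) : Int := if PySem.Int.mod i 2 == 0 then 1 else -1

def pairOf (w h_ i j : Int) : Option (Int × Int) :=
  if j + opA i ≥ 0 ∧ j + opA i < w then some (i*w + j, j + opA i + i*w)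
  else if i + 1 < h_ then some (i*w + j, (i+1)*w + j)
  else none

def addPair (g : List (List String)) (ab : Int × Int) : List (List String) :=
  pyApp (pyApp g ab.1 (PySem.Int.toStr ab.2)) ab.2 (PySem.Int.toStr ab.1)

def rowOf (w i : Int) : List Int :=
  if PySem.Int.mod i 2 == 0 then PySem.List.pyRange (i*w) (i*w + w) 1
  else PySem.List.pyRange (i*w + w - 1) (i*w - 1) (-1)

def pairsOf (l : List Int) : List (Int × Int) := l.zip (l.drop 1)

def gStep (w h_ i : Int) (g : List (List String)) (j : Int) : List (List String) :=
  match pairOf w h_ i j with | some pr => addPair g pr | none => g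

def posStepA (w : Int) (p : List (List Int)) (i : Int) : List (List Int) :=
  (jlistA w i).foldl (fun p j => pySet p (i*w + j) [i, j]) p

def posStepB (w : Int) (p : List (List Int)) (i : Int) : List (List Int) :=
  (rowOf w i).foldl (fun p u => pySet p u [i, u - i*w]) p

-- generic fold lemmas
theorem foldl_split {α β γ : Type} (f : α × β → γ → α × β) (f1 : α → γ → α) (f2 : β → γ → β)
    (h : ∀ a b x, f (a, b) x = (f1 a x, f2 b x)) :
    ∀ (l : List γ) (a : α) (b : β), l.foldl f (a, b) = (l.foldl f1 a, l.foldl f2 b) := by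
  intro l
  induction l with
  | nil => intro a b; rfl
  | cons x t ih => intro a b; simp only [List.foldl_cons, h]; exact ih _ _

theorem foldl_filterMap {α β γ : Type} (g : γ → Option β) (f : α → β → α) (step : α → γ → α)
    (h : ∀ a x, step a x = match g x with | some y => f a y | none => a) :
    ∀ (l : List γ) (a : α), l.foldl step a = (l.filterMap g).foldl f a := by
  intro l
  induction l with
  | nil => intro a; rfl
  | cons x t ih =>
      intro a
      simp only [List.foldl_cons, List.filterMap_cons, h]
      cases g x with
      | none => exact ih _
      | some y => simp only [List.foldl_cons]; exact ih _

theorem foldl_flatMap {α β γ : Type} (f : γ → List β) (g : α → β → α) :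
    ∀ (l : List γ) (a : α), (l.flatMap f).foldl g a = l.foldl (fun a x => (f x).foldl g a) a := by
  intro l
  induction l with
  | nil => intro a; rfl
  | cons x t ih => intro a; simp only [List.flatMap_cons, List.foldl_append, List.foldl_cons]; exact ih _

theorem rowMap (a w : Int) :
    PySem.List.pyRange a (a + w) 1 = (PySem.List.pyRange 0 w 1).map (fun j => a + j) := by
  rw [PySem.List.pyRange_one, PySem.List.pyRange_one, List.map_map]
  have h1 : a + w - a = w - 0 := by ring
  rw [h1]
  congr 1
  funext k; simp

theorem revneg (a w : Int) :
    PySem.List.pyRange (a + w - 1) (a - 1) (-1) = (PySem.List.pyRange a (a + w) 1).reverse := by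
  rw [PySem.List.pyRange_neg_one_eq_reverse]
  have h1 : a - 1 + 1 = a := by ring
  have h2 : a + w - 1 + 1 = a + w := by ring
  rw [h1, h2]

theorem rowOf_eq_map (w i : Int) : rowOf w i = (jlistA w i).map (fun j => i*w + j) := by
  unfold rowOf jlistA
  by_cases hp : (PySem.Int.mod i 2 == 0) = true
  · rw [if_pos hp, if_pos hp]; exact rowMap (i*w) w
  · rw [if_neg hp, if_neg hp, revneg (i*w) w, rowMap (i*w) w, List.map_reverse]

theorem pyRange_shift (a w : Int) :
    PySem.List.pyRange a (a + w) 1 = (List.range w.toNat).map (fun (k : Nat) => a + (k : Int)) := by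
  rw [PySem.List.pyRange_one]
  have h1 : a + w - a = w := by ring
  rw [h1]

theorem pairsOf_cons_cons (x y : Int) (l : List Int) :
    pairsOf (x :: y :: l) = (x, y) :: pairsOf (y :: l) := rfl

theorem pairsOf_range_map (f : Nat → Int) (n : Nat) :
    pairsOf ((List.range n).map f) = (List.range (n - 1)).map (fun k => (f k, f (k + 1))) := by
  unfold pairsOf
  apply List.ext_getElem
  · simp
  · intro k h1 h2
    simp [List.getElem_zip]

theorem pairsOf_reverse (l : List Int) :
    pairsOf l.reverse = ((pairsOf l).map (fun p => (p.2, p.1))).reverse := by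
  unfold pairsOf
  apply List.ext_getElem
  · simp
  · intro k h1 h2
    simp only [List.length_zip, List.length_drop, List.length_reverse, List.length_map] at h1 h2
    simp [List.getElem_zip, List.getElem_reverse]
    congr 1
    omega

theorem pairsOf_append (l1 : List Int) (a b : Int) (l2 : List Int) :
    pairsOf ((l1 ++ [a]) ++ b :: l2) = pairsOf (l1 ++ [a]) ++ (a, b) :: pairsOf (b :: l2) := by
  induction l1 with
  | nil => simp [pairsOf]
  | cons x t ih =>
      rcases t with _ | ⟨y, t'⟩
      · simp [pairsOf]
      · simp only [List.cons_append, List.append_assoc] at ih ⊢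
        rw [pairsOf_cons_cons, pairsOf_cons_cons, ih]
        simp

theorem filterMap_some_eq_map {α β : Type} (f : α → β) (l : List α) :
    l.filterMap (fun x => some (f x)) = l.map f := by
  induction l with
  | nil => rfl
  | cons x t ih => simp [ih]

-- row shapes

theorem rowOf_even (w i : Int) (hpar : PySem.Int.mod i 2 = 0) :
    rowOf w i = (List.range w.toNat).map (fun (k : Nat) => i*w + (k : Int)) := by
  unfold rowOf
  rw [if_pos (by simp only [beq_iff_eq]; exact hpar), pyRange_shift]

theorem rowOf_odd (w i : Int) (hpar : PySem.Int.mod i 2 = 1) :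
    rowOf w i = ((List.range w.toNat).map (fun (k : Nat) => i*w + (k : Int))).reverse := by
  unfold rowOf
  rw [if_neg (by simp only [beq_iff_eq, hpar]; exact one_ne_zero), revneg (i*w) w, pyRange_shift]

theorem rowOf_cons (w i : Int) (hw : 0 < w) :
    ∃ t, rowOf w i = (if PySem.Int.mod i 2 == 0 then i*w else i*w + w - 1) :: t := by
  unfold rowOf
  by_cases hp : (PySem.Int.mod i 2 == 0) = true
  · rw [if_pos hp, if_pos hp, PySem.List.pyRange_one_cons (by omega)]
    exact ⟨_, rfl⟩
  · rw [if_neg hp, if_neg hp, PySem.List.pyRange_neg_one_cons (by omega)]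
    exact ⟨_, rfl⟩

theorem rowOf_last (w i : Int) (hw : 0 < w) :
    ∃ t, rowOf w i = t ++ [(if PySem.Int.mod i 2 == 0 then i*w + w - 1 else i*w)] := by
  unfold rowOf
  by_cases hp : (PySem.Int.mod i 2 == 0) = true
  · rw [if_pos hp, if_pos hp]
    refine ⟨PySem.List.pyRange (i*w) (i*w + w - 1) 1, ?_⟩
    rw [← PySem.List.pyRange_one_succ_right (by omega : i*w ≤ i*w + w - 1)]
    congr 1
    ring
  · rw [if_neg hp, if_neg hp, revneg (i*w) w, PySem.List.pyRange_one_cons (by omega)]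
    exact ⟨(PySem.List.pyRange (i*w + 1) (i*w + w) 1).reverse, by simp⟩

theorem opA_even (i : Int) (hpar : PySem.Int.mod i 2 = 0) : opA i = 1 := by
  unfold opA; rw [if_pos (by simp only [beq_iff_eq]; exact hpar)]

theorem opA_odd (i : Int) (hpar : PySem.Int.mod i 2 = 1) : opA i = -1 := by
  unfold opA; rw [if_neg (by simp only [beq_iff_eq, hpar]; exact one_ne_zero)]

theorem rowPairs_even (w h_ i : Int) (hw : 0 < w) (hpar : PySem.Int.mod i 2 = 0) (hl : ¬ i + 1 < h_) :
    (jlistA w i).filterMap (pairOf w h_ i) = pairsOf (rowOf w i) := by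
  have hj : jlistA w i = PySem.List.pyRange 0 w 1 := by
    unfold jlistA; rw [if_pos (by simp only [beq_iff_eq]; exact hpar)]
  have hsplit : PySem.List.pyRange 0 w 1 = PySem.List.pyRange 0 (w-1) 1 ++ [w-1] := by
    rw [← PySem.List.pyRange_one_succ_right (by omega : (0:Int) ≤ w - 1)]
    congr 1; ring
  have hop := opA_even i hpar
  have hc : ∀ j ∈ PySem.List.pyRange 0 (w-1) 1,
      pairOf w h_ i j = (fun j => some ((i*w + j, i*w + j + 1) : Int × Int)) j := by
    intro j hj2
    rw [PySem.List.mem_pyRange_one] at hj2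
    simp only [pairOf, hop]
    rw [if_pos ⟨by omega, by omega⟩]
    have hv : j + 1 + i*w = i*w + j + 1 := by ring
    rw [hv]
  have hlast : pairOf w h_ i (w-1) = none := by
    simp only [pairOf, hop]
    rw [if_neg (by omega), if_neg hl]
  rw [hj, hsplit, List.filterMap_append, List.filterMap_congr hc, filterMap_some_eq_map]
  simp only [List.filterMap_cons, hlast, List.filterMap_nil, List.append_nil]
  rw [rowOf_even w i hpar, pairsOf_range_map]
  have hr : PySem.List.pyRange 0 (w-1) 1 = (List.range (w-1).toNat).map (fun (k : Nat) => (0:Int) + (k:Int)) := by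
    rw [← pyRange_shift]; congr 1; ring
  rw [hr, List.map_map]
  congr 1
  · funext k; simp [Prod.ext_iff]; ring
  · congr 1; omega

theorem rowPairs_even_nl (w h_ i : Int) (hw : 0 < w) (hpar : PySem.Int.mod i 2 = 0) (hl : i + 1 < h_) :
    (jlistA w i).filterMap (pairOf w h_ i) = pairsOf (rowOf w i) ++ [(i*w + w - 1, (i+1)*w + w - 1)] := by
  have hj : jlistA w i = PySem.List.pyRange 0 w 1 := by
    unfold jlistA; rw [if_pos (by simp only [beq_iff_eq]; exact hpar)]
  have hsplit : PySem.List.pyRange 0 w 1 = PySem.List.pyRange 0 (w-1) 1 ++ [w-1] := by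
    rw [← PySem.List.pyRange_one_succ_right (by omega : (0:Int) ≤ w - 1)]
    congr 1; ring
  have hop := opA_even i hpar
  have hc : ∀ j ∈ PySem.List.pyRange 0 (w-1) 1,
      pairOf w h_ i j = (fun j => some ((i*w + j, i*w + j + 1) : Int × Int)) j := by
    intro j hj2
    rw [PySem.List.mem_pyRange_one] at hj2
    simp only [pairOf, hop]
    rw [if_pos ⟨by omega, by omega⟩]
    have hv : j + 1 + i*w = i*w + j + 1 := by ring
    rw [hv]
  have hlast : pairOf w h_ i (w-1) = some (i*w + w - 1, (i+1)*w + w - 1) := by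
    simp only [pairOf, hop]
    rw [if_neg (by omega), if_pos hl]
    have h1 : i*w + (w-1) = i*w + w - 1 := by ring
    have h2 : (i+1)*w + (w-1) = (i+1)*w + w - 1 := by ring
    rw [h1, h2]
  rw [hj, hsplit, List.filterMap_append, List.filterMap_congr hc, filterMap_some_eq_map]
  simp only [List.filterMap_cons, hlast, List.filterMap_nil]
  congr 1
  rw [rowOf_even w i hpar, pairsOf_range_map]
  have hr : PySem.List.pyRange 0 (w-1) 1 = (List.range (w-1).toNat).map (fun (k : Nat) => (0:Int) + (k:Int)) := by
    rw [← pyRange_shift]; congr 1; ring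
  rw [hr, List.map_map]
  congr 1
  · funext k; simp [Prod.ext_iff]; ring
  · congr 1; omega

theorem rowPairs_odd_core (w h_ i : Int) (hw : 0 < w) (hpar : PySem.Int.mod i 2 = 1) :
    ((PySem.List.pyRange 1 w 1).filterMap (pairOf w h_ i)).reverse = pairsOf (rowOf w i) := by
  have hop := opA_odd i hpar
  have hc : ∀ j ∈ PySem.List.pyRange 1 w 1,
      pairOf w h_ i j = (fun j => some ((i*w + j, i*w + j - 1) : Int × Int)) j := by
    intro j hj2
    rw [PySem.List.mem_pyRange_one] at hj2
    simp only [pairOf, hop]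
    rw [if_pos ⟨by omega, by omega⟩]
    have hv : j + -1 + i*w = i*w + j - 1 := by ring
    rw [hv]
  rw [List.filterMap_congr hc, filterMap_some_eq_map]
  rw [rowOf_odd w i hpar, pairsOf_reverse, pairsOf_range_map, List.map_map]
  have hr : PySem.List.pyRange 1 w 1 = (List.range (w-1).toNat).map (fun (k : Nat) => 1 + (k:Int)) := by
    rw [← pyRange_shift]; congr 1; ring
  rw [hr, List.map_map, show (w-1).toNat = w.toNat - 1 from by omega]
  apply congrArg List.reverse
  apply List.map_congr_left
  intro k _
  simp [Prod.ext_iff]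
  constructor <;> ring

theorem rowPairs_odd (w h_ i : Int) (hw : 0 < w) (hpar : PySem.Int.mod i 2 = 1) (hl : ¬ i + 1 < h_) :
    (jlistA w i).filterMap (pairOf w h_ i) = pairsOf (rowOf w i) := by
  have hj : jlistA w i = (PySem.List.pyRange 0 w 1).reverse := by
    unfold jlistA; rw [if_neg (by simp only [beq_iff_eq, hpar]; exact one_ne_zero)]
  have hop := opA_odd i hpar
  have h0 : pairOf w h_ i 0 = none := by
    simp only [pairOf, hop]
    rw [if_neg (by omega), if_neg hl]
  rw [hj, List.filterMap_reverse, PySem.List.pyRange_one_cons (by omega : (0:Int) < w),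
      List.filterMap_cons]
  simp only [h0]
  exact rowPairs_odd_core w h_ i hw hpar

theorem rowPairs_odd_nl (w h_ i : Int) (hw : 0 < w) (hpar : PySem.Int.mod i 2 = 1) (hl : i + 1 < h_) :
    (jlistA w i).filterMap (pairOf w h_ i) = pairsOf (rowOf w i) ++ [(i*w, (i+1)*w)] := by
  have hj : jlistA w i = (PySem.List.pyRange 0 w 1).reverse := by
    unfold jlistA; rw [if_neg (by simp only [beq_iff_eq, hpar]; exact one_ne_zero)]
  have hop := opA_odd i hpar
  have h0 : pairOf w h_ i 0 = some (i*w, (i+1)*w) := by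
    simp only [pairOf, hop]
    rw [if_neg (by omega), if_pos hl]
    have h1 : i*w + 0 = i*w := by ring
    have h2 : (i+1)*w + 0 = (i+1)*w := by ring
    rw [h1, h2]
  rw [hj, List.filterMap_reverse, PySem.List.pyRange_one_cons (by omega : (0:Int) < w),
      List.filterMap_cons]
  simp only [h0, List.reverse_cons, zero_add]
  rw [rowPairs_odd_core w h_ i hw hpar]

theorem parity (i : Int) : PySem.Int.mod i 2 = 0 ∨ PySem.Int.mod i 2 = 1 := by
  rw [PySem.Int.mod_eq_emod_of_pos (by norm_num)]; omega

theorem parity_succ (i : Int) (hp : PySem.Int.mod i 2 = 0) : PySem.Int.mod (i+1) 2 = 1 := by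
  rw [PySem.Int.mod_eq_emod_of_pos (by norm_num)] at *; omega

theorem parity_succ' (i : Int) (hp : PySem.Int.mod i 2 = 1) : PySem.Int.mod (i+1) 2 = 0 := by
  rw [PySem.Int.mod_eq_emod_of_pos (by norm_num)] at *; omega

theorem pairs_main (w h_ : Int) (hw : 0 < w) :
    ∀ (k : Nat) (i : Int), i + k = h_ →
      (PySem.List.pyRange i h_ 1).flatMap (fun i => (jlistA w i).filterMap (pairOf w h_ i)) =
        pairsOf ((PySem.List.pyRange i h_ 1).flatMap (rowOf w)) := by
  intro k
  induction k with
  | zero =>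
      intro i hk
      rw [PySem.List.pyRange_one_eq_nil (by push_cast at hk; omega)]
      rfl
  | succ k ih =>
      intro i hk
      have hilt : i < h_ := by push_cast at hk; omega
      rw [PySem.List.pyRange_one_cons hilt, List.flatMap_cons, List.flatMap_cons]
      cases k with
      | zero =>
          have hend : h_ ≤ i + 1 := by push_cast at hk; omega
          rw [PySem.List.pyRange_one_eq_nil hend]
          simp only [List.flatMap_nil, List.append_nil]
          rcases parity i with hp | hp
          · exact rowPairs_even w h_ i hw hp (by omega)
          · exact rowPairs_odd w h_ i hw hp (by omega)
      | succ k' =>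
          have hl : i + 1 < h_ := by push_cast at hk; omega
          rw [ih (i+1) (by push_cast at hk ⊢; omega)]
          obtain ⟨t, ht⟩ := rowOf_cons w (i+1) hw
          obtain ⟨tl, htl⟩ := rowOf_last w i hw
          rw [PySem.List.pyRange_one_cons hl, List.flatMap_cons]
          rcases parity i with hp | hp
          · have h1 : ¬ ((PySem.Int.mod (i+1) 2 == 0) = true) := by
              simp only [beq_iff_eq, parity_succ i hp]; exact one_ne_zero
            have h2 : ((PySem.Int.mod i 2 == 0) = true) := by
              simp only [beq_iff_eq]; exact hp
            rw [if_neg h1] at ht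
            rw [if_pos h2] at htl
            rw [ht, rowPairs_even_nl w h_ i hw hp hl, htl]
            rw [show (((i+1)*w + w - 1) :: t) ++ List.flatMap (rowOf w) (PySem.List.pyRange (i+1+1) h_ 1)
                  = ((i+1)*w + w - 1) :: (t ++ List.flatMap (rowOf w) (PySem.List.pyRange (i+1+1) h_ 1)) from by simp]
            rw [pairsOf_append]
            simp
          · have h1 : ((PySem.Int.mod (i+1) 2 == 0) = true) := by
              simp only [beq_iff_eq]; exact parity_succ' i hp
            have h2 : ¬ ((PySem.Int.mod i 2 == 0) = true) := by
              simp only [beq_iff_eq, hp]; exact one_ne_zero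
            rw [if_pos h1] at ht
            rw [if_neg h2] at htl
            rw [ht, rowPairs_odd_nl w h_ i hw hp hl, htl]
            rw [show (((i+1)*w) :: t) ++ List.flatMap (rowOf w) (PySem.List.pyRange (i+1+1) h_ 1)
                  = ((i+1)*w) :: (t ++ List.flatMap (rowOf w) (PySem.List.pyRange (i+1+1) h_ 1)) from by simp]
            rw [pairsOf_append]
            simp

theorem pairs_eq (w h_ : Int) :
    (PySem.List.pyRange 0 h_ 1).flatMap (fun i => (jlistA w i).filterMap (pairOf w h_ i)) =
      pairsOf ((PySem.List.pyRange 0 h_ 1).flatMap (rowOf w)) := by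
  by_cases hw : 0 < w
  · by_cases hh : 0 ≤ h_
    · exact pairs_main w h_ hw h_.toNat 0 (by omega)
    · rw [PySem.List.pyRange_one_eq_nil (by omega)]; rfl
  · have hj : ∀ i : Int, jlistA w i = [] := by
      intro i
      unfold jlistA
      rw [PySem.List.pyRange_one_eq_nil (by omega)]
      split_ifs <;> rfl
    have hr : ∀ i : Int, rowOf w i = [] := by
      intro i
      unfold rowOf
      split_ifs with h
      · exact PySem.List.pyRange_one_eq_nil (by linarith)
      · exact PySem.List.pyRange_neg_one_eq_nil (by linarith)
    have hrf : rowOf w = fun _ : Int => ([] : List Int) := funext hr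
    simp only [hj, List.filterMap_nil, hrf]
    have hemp : ∀ {β : Type} (l : List Int), l.flatMap (fun _ => ([] : List β)) = [] := by
      intro b l; induction l with
      | nil => rfl
      | cons x t ih => simp [ih]
    rw [hemp, hemp]
    rfl

theorem A_eq (w h_ : Int) :
    generate_spiral w h_ =
      (w*h_,
       ((PySem.List.pyRange 0 h_ 1).flatMap (fun i => (jlistA w i).filterMap (pairOf w h_ i))).foldl
         addPair ((PySem.List.pyRange 0 (w*h_) 1).map (fun _ => [])),
       (PySem.List.pyRange 0 h_ 1).foldl (posStepA w) ((PySem.List.pyRange 0 (w*h_) 1).map (fun _ => []))) := by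
  unfold generate_spiral
  dsimp only
  rw [foldl_split _ (fun g i => ((jlistA w i).filterMap (pairOf w h_ i)).foldl addPair g)
        (posStepA w) ?_, foldl_flatMap]
  intro a b i
  rw [foldl_split _ (gStep w h_ i) (fun p j => pySet p (i*w + j) [i, j]) ?_]
  · exact congrArg₂ Prod.mk
      (foldl_filterMap (pairOf w h_ i) addPair (gStep w h_ i) (fun a x => by unfold gStep; cases pairOf w h_ i x <;> rfl) _ a) rfl
  · intro g p j
    simp only [gStep, pairOf, addPair, opA]
    split_ifs <;> rfl

theorem B_eq (w h_ : Int) :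
    generate_spiral_alt w h_ =
      (w*h_,
       (pairsOf ((PySem.List.pyRange 0 h_ 1).flatMap (rowOf w))).foldl
         addPair ((PySem.List.pyRange 0 (w*h_) 1).map (fun _ => [])),
       (PySem.List.pyRange 0 h_ 1).foldl (posStepB w) ((PySem.List.pyRange 0 (w*h_) 1).map (fun _ => []))) := by
  unfold generate_spiral_alt
  dsimp only
  rw [foldl_split _ (fun o i => o ++ rowOf w i) (posStepB w) ?_]
  · rw [show ((PySem.List.pyRange 0 h_ 1).foldl (fun o i => o ++ rowOf w i) []) =
        [] ++ (PySem.List.pyRange 0 h_ 1).flatMap (rowOf w) from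
          PySem.List.foldl_append_eq_flatMap _ _ _]
    rfl
  · intro a b i
    rfl

theorem pos_eq (w : Int) (p : List (List Int)) (i : Int) : posStepB w p i = posStepA w p i := by
  unfold posStepA posStepB
  rw [rowOf_eq_map, List.foldl_map]
  congr 1
  funext p j
  have h1 : i*w + j - i*w = j := by ring
  rw [h1]

-- ===== VERDICT (by name: the statement is the Claim_ definition above) =====
theorem generate_spiral_spec : Claim_equal_generate_spiral := by
  intro w h_ _
  unfold Spec_generate_spiral
  have hp : posStepB w = posStepA w := funext fun p => funext fun i => pos_eq w p i
  rw [A_eq, B_eq, pairs_eq, hp]
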